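-- pv_equiv track=rewrite | github.com/Harshad725250/Zero_Trust_Multi_Cloud_Framework | evaluate_metrics.py | calculate_iac_metrics
-- ===== SOURCE A (Python) =====
-- def calculate_iac_metrics(iac_data):
--     total_findings = len(iac_data)
--     s3 = sum(1 for f in iac_data if "S3" in f.get("finding", ""))
--     sg = sum(1 for f in iac_data if "Security group" in f.get("finding", ""))
--     iam = sum(1 for f in iac_data if "IAM" in f.get("finding", ""))
--     return {
--         "Total Findings": total_findings,
--         "S3 Issues": s3,
--         "Security Group Issues": sg,
--         "IAM Policy Issues": iam
--     }
-- ===== SOURCE B (Python) =====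
-- TABLE = (("S3 Issues", "S3"),
--          ("Security Group Issues", "Security group"),
--          ("IAM Policy Issues", "IAM"))
--
--
-- def calculate_iac_metrics(iac_data):
--     # Emit one event per (finding, matching table row), then tally the event stream.
--     events = [label
--               for f in iac_data
--               for (label, kw) in TABLE
--               if kw in f.get("finding", "")]
--     counts = {}
--     for label in events:
--         counts[label] = counts.get(label, 0) + 1
--     metrics = {"Total Findings": len(iac_data)}
--     for label, _ in TABLE:
--         metrics[label] = counts.get(label, 0)
--     return metrics
-- ===== Notes on version B (the rewrite author's own statement) =====
-- stated objective: alternative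
-- what changed: Replaces A's four hard-coded scans with a table-driven emit-then-tally pipeline: a (label, keyword) table maps each finding to a stream of category-label events, a counter dict tallies the stream once, and the result dict is assembled from table lookups.
import Mathlib
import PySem

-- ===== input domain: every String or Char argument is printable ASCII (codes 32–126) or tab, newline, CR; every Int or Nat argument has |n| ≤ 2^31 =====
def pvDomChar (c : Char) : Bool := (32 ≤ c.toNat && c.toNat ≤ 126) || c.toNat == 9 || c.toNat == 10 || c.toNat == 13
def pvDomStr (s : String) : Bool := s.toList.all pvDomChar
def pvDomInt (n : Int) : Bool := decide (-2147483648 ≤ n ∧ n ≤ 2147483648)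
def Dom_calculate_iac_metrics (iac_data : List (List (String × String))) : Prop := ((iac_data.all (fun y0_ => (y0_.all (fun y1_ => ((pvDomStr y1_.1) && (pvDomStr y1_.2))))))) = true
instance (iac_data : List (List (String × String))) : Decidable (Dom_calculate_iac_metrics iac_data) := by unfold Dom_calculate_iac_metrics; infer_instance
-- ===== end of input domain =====

-- B replaces A's four hard-coded scans with a table-driven emit-then-tally pipeline
-- (keyword table → label-event stream → counter dict → assemble result); objective: alternative.

-- ===== PORT A =====
def calculate_iac_metrics (iac_data : List (List (String × String))) : List (String × Int) :=
  let total_findings : Int := iac_data.length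
  let s3 : Int := iac_data.foldl (fun acc f => if PySem.Str.isIn "S3" (PySem.Dict.getD (PySem.Dict.mk f) "finding" "") then acc + 1 else acc) 0
  let sg : Int := iac_data.foldl (fun acc f => if PySem.Str.isIn "Security group" (PySem.Dict.getD (PySem.Dict.mk f) "finding" "") then acc + 1 else acc) 0
  let iam : Int := iac_data.foldl (fun acc f => if PySem.Str.isIn "IAM" (PySem.Dict.getD (PySem.Dict.mk f) "finding" "") then acc + 1 else acc) 0
  [("Total Findings", total_findings), ("S3 Issues", s3),
   ("Security Group Issues", sg), ("IAM Policy Issues", iam)]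

-- ===== PORT B =====
-- Source B's module-level TABLE
def pvTable : List (String × String) :=
  [("S3 Issues", "S3"), ("Security Group Issues", "Security group"), ("IAM Policy Issues", "IAM")]

def calculate_iac_metrics_alt (iac_data : List (List (String × String))) : List (String × Int) :=
  let events : List String :=
    iac_data.flatMap (fun f =>
      (pvTable.filter (fun p =>
        PySem.Str.isIn p.2 (PySem.Dict.getD (PySem.Dict.mk f) "finding" ""))).map (·.1))
  let counts : PySem.Dict String Int :=
    events.foldl (fun d x => d.modify x 0 (· + 1)) PySem.Dict.empty
  let metrics : PySem.Dict String Int :=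
    PySem.Dict.empty.insert "Total Findings" (iac_data.length : Int)
  let metrics := pvTable.foldl (fun d p => d.insert p.1 (counts.getD p.1 0)) metrics
  metrics.items

-- ===== PRECONDITION & SPEC =====
def Spec_calculate_iac_metrics (iac_data : List (List (String × String))) (out : List (String × Int)) : Prop := out = calculate_iac_metrics_alt iac_data
instance (iac_data : List (List (String × String))) (out : List (String × Int)) : Decidable (Spec_calculate_iac_metrics iac_data out) := by unfold Spec_calculate_iac_metrics; infer_instance

-- ===== CLAIM =====
def Claim_equal_calculate_iac_metrics : Prop := ∀ (iac_data : List (List (String × String))), Dom_calculate_iac_metrics iac_data → Spec_calculate_iac_metrics iac_data (calculate_iac_metrics iac_data)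

-- ===== LEMMAS AND PROOFS =====

-- The label events one finding emits contain a table label once iff its keyword matches.
theorem count_events_elem (label kw : String) (hmem : (label, kw) ∈ pvTable) (s : String) :
    ((pvTable.filter (fun p => PySem.Str.isIn p.2 s)).map (·.1)).count label
      = if PySem.Str.isIn kw s then 1 else 0 := by
  cases h1 : PySem.Chars.isIn ['S', '3'] s.toList <;>
    cases h2 : PySem.Chars.isIn ['S', 'e', 'c', 'u', 'r', 'i', 't', 'y', ' ', 'g', 'r', 'o', 'u', 'p'] s.toList <;>
      cases h3 : PySem.Chars.isIn ['I', 'A', 'M'] s.toList <;>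
        fin_cases hmem <;> simp [pvTable, List.filter, PySem.Str.isIn, h1, h2, h3]

-- Counting one label in the whole event stream equals A's per-category scan.
theorem count_event_stream (label kw : String)
    (hper : ∀ s : String,
      ((pvTable.filter (fun p => PySem.Str.isIn p.2 s)).map (·.1)).count label
        = if PySem.Str.isIn kw s then 1 else 0)
    (iac_data : List (List (String × String))) :
    ((iac_data.flatMap (fun f =>
        (pvTable.filter (fun p =>
          PySem.Str.isIn p.2 (PySem.Dict.getD (PySem.Dict.mk f) "finding" ""))).map (·.1))).count label : Int)
      = iac_data.foldl (fun acc f => if PySem.Str.isIn kw (PySem.Dict.getD (PySem.Dict.mk f) "finding" "") then acc + 1 else acc) 0 := by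
  rw [PySem.List.foldl_if_add_one]
  induction iac_data with
  | nil => simp
  | cons hd tl ih =>
    simp only [List.flatMap_cons, List.count_append, List.countP_cons, hper]
    split_ifs <;> push_cast <;> omega

-- ===== VERDICT =====
theorem calculate_iac_metrics_spec : Claim_equal_calculate_iac_metrics := by
  intro iac_data _
  unfold Spec_calculate_iac_metrics calculate_iac_metrics calculate_iac_metrics_alt
  simp only [PySem.Dict.getD_foldl_modify_add_one, PySem.Dict.getD_empty]
  rw [PySem.Dict.items_foldl_insert_fresh _ _ _ _
      (by intro a ha; fin_cases ha <;>
        simp [PySem.Dict.contains_insert, PySem.Dict.contains_empty])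
      (by decide)]
  simp only [pvTable, List.map_cons, List.map_nil]
  rw [← count_event_stream "S3 Issues" "S3" (count_events_elem _ _ (by decide)),
      ← count_event_stream "Security Group Issues" "Security group" (count_events_elem _ _ (by decide)),
      ← count_event_stream "IAM Policy Issues" "IAM" (count_events_elem _ _ (by decide))]
  simp [PySem.Dict.insert, PySem.Dict.empty, pvTable]
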